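-- pv_equiv track=rewrite | github.com/xingminw/ngsim-data-process | cores/utils/time_utils.py | get_date_time_list
-- ===== SOURCE A (Python) =====
-- def get_date_time_list(resolution=20):
--     """
--     give resolution (min), output the full list of the time
--
--     :param resolution: unit, minute should be divided by 60
--     :return: ["00:00", "00:20", ..., "24:00"]
--     """
--     hourly_cuts = int(60 / resolution)
--     total_nums = hourly_cuts * 24
--     time_list = []
--     for idx in range(total_nums):
--         first_num = int(idx / hourly_cuts)
--         first_string = str(first_num).zfill(2)
--         second_num = int(idx % hourly_cuts) * resolution
--         second_string = str(second_num).zfill(2)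
--         overall_time = f'{first_string}:{second_string}'
--         time_list.append(overall_time)
--     time_list += ['24:00']
--     return time_list
-- ===== SOURCE B (Python) =====
-- def get_date_time_list(resolution=20):
--     """Same output as A: two nested loops (hour, slot) instead of one flat
--     index loop with div/mod decoding."""
--     hourly_cuts = int(60 / resolution)
--     time_list = []
--     for hour in range(24):
--         for slot in range(hourly_cuts):
--             minute = slot * resolution
--             time_list.append(f'{hour:02d}:{minute:02d}')
--     time_list.append('24:00')
--     return time_list
-- ===== Notes on version B (the rewrite author's own statement) =====
-- stated objective: simpler
-- what changed: Replaces the flat index loop that decodes hour/minute with div and mod by two nested loops over hour and slot, with f-string zero-padding instead of str().zfill(2).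
import Mathlib
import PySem

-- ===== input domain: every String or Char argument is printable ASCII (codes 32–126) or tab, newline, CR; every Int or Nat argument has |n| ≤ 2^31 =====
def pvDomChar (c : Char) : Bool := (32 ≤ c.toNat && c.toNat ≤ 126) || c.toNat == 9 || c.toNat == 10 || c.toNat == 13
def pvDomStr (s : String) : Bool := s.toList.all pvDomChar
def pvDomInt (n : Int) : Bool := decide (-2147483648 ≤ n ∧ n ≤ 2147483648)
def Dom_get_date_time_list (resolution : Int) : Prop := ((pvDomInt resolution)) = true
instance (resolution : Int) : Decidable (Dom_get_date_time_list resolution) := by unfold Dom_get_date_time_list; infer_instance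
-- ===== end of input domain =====

-- B replaces A's flat index loop (decoding hour/minute with div and mod) by two
-- nested loops over hour and slot; objective: simpler, same cost.


-- ===== PORT A =====
def get_date_time_list (resolution : Int) : List String :=
  -- int(60 / resolution): true division then int() truncates toward zero;
  -- exact as Int.tdiv for integer |resolution| ≤ 2^31 (no float rounding crosses an integer there)
  let hourly_cuts : Int := Int.tdiv 60 resolution
  let total_nums : Int := hourly_cuts * 24
  let time_list : List String :=
    (PySem.List.pyRange 0 total_nums 1).foldl (fun time_list idx =>
      -- int(idx / hourly_cuts): idx and hourly_cuts are nonnegative small ints here, trunc = exact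
      let first_num : Int := Int.tdiv idx hourly_cuts
      let first_string : String := PySem.Str.zfill (PySem.Int.toStr first_num) 2
      let second_num : Int := PySem.Int.mod idx hourly_cuts * resolution
      let second_string : String := PySem.Str.zfill (PySem.Int.toStr second_num) 2
      let overall_time : String := first_string ++ ":" ++ second_string
      time_list ++ [overall_time]) []
  time_list ++ ["24:00"]

-- ===== PORT B =====
-- f'{n:02d}' for the nonnegative ints produced here = str(n).zfill(2)
def pvFmt02 (n : Int) : String := PySem.Str.zfill (PySem.Int.toStr n) 2

def get_date_time_list_alt (resolution : Int) : List String :=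
  let hourly_cuts : Int := Int.tdiv 60 resolution   -- same comment as in port A
  let time_list : List String :=
    (PySem.List.pyRange 0 24 1).foldl (fun time_list hour =>
      (PySem.List.pyRange 0 hourly_cuts 1).foldl (fun time_list slot =>
        let minute : Int := slot * resolution
        time_list ++ [pvFmt02 hour ++ ":" ++ pvFmt02 minute]) time_list) []
  time_list ++ ["24:00"]

-- ===== PRECONDITION & SPEC =====
-- Pre_ excludes only the zero resolution, on which A (and B alike) raises ZeroDivisionError; A returns on every other int.
def Pre_get_date_time_list (resolution : Int) : Prop := resolution ≠ 0
instance (resolution : Int) : Decidable (Pre_get_date_time_list resolution) := by unfold Pre_get_date_time_list; infer_instance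
def pvWitness_get_date_time_list : Int := (20)

def Spec_get_date_time_list (resolution : Int) (out : List String) : Prop := out = get_date_time_list_alt resolution
instance (resolution : Int) (out : List String) : Decidable (Spec_get_date_time_list resolution out) := by unfold Spec_get_date_time_list; infer_instance

-- ===== CLAIM (what is proved, stated in full; the proofs are below) =====
def Claim_equal_get_date_time_list : Prop := ∀ (resolution : Int), Dom_get_date_time_list resolution → Pre_get_date_time_list resolution → Spec_get_date_time_list resolution (get_date_time_list resolution)

-- ===== LEMMAS AND PROOFS =====

-- For 0 < hc, mapping f over range(n*hc) equals, block by block, the nested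
-- (hour, slot) traversal, provided f decodes as g on each block.
lemma pv_map_range_mul_eq_flatMap {α : Type} (hc : Int) (hhc : 0 < hc)
    (f : Int → α) (g : Int → Int → α)
    (hfg : ∀ h s : Int, 0 ≤ h → 0 ≤ s → s < hc → f (h * hc + s) = g h s) (n : Nat) :
    (PySem.List.pyRange 0 ((n : Int) * hc) 1).map f
      = (PySem.List.pyRange 0 (n : Int) 1).flatMap (fun h => (PySem.List.pyRange 0 hc 1).map (g h)) := by
  induction n with
  | zero => simp [PySem.List.pyRange_one_eq_nil]
  | succ n ih =>
    have h1 : (0 : Int) ≤ (n : Int) * hc := by positivity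
    have h2 : ((n : Int)) * hc ≤ ((n : Int) + 1) * hc := by nlinarith
    rw [show ((n + 1 : Nat) : Int) = (n : Int) + 1 by push_cast; ring,
        show ((n : Int) + 1) * hc = (n : Int) * hc + hc by ring]
    rw [PySem.List.pyRange_one_append 0 ((n : Int) * hc) ((n : Int) * hc + hc) h1 (by omega),
        PySem.List.pyRange_one_succ_right (by positivity : (0 : Int) ≤ (n : Int)),
        List.map_append, List.flatMap_append, ih]
    congr 1
    rw [PySem.List.pyRange_one ((n : Int) * hc), PySem.List.pyRange_one 0 hc]
    have he : ((n : Int) * hc + hc - (n : Int) * hc).toNat = (hc - 0).toNat := by omega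
    rw [he]
    simp only [List.map_map, List.flatMap_cons, List.flatMap_nil, List.append_nil]
    refine List.map_congr_left (fun k hk => ?_)
    have hk' : (k : Int) < hc := by
      have := List.mem_range.mp hk; omega
    have := hfg (n : Int) (k : Int) (by positivity) (by positivity) hk'
    simpa using this

-- decoding a flat index h*hc + s back into (h, s) when 0 < hc
lemma pv_decode (hc h s : Int) (hhc : 0 < hc) (hh : 0 ≤ h) (hs : 0 ≤ s) (hsl : s < hc) :
    Int.tdiv (h * hc + s) hc = h ∧ PySem.Int.mod (h * hc + s) hc = s := by
  constructor
  · rw [Int.tdiv_eq_ediv]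
    have : (h * hc + s) / hc = h := by
      rw [add_comm, Int.add_mul_ediv_right s h (by omega), Int.ediv_eq_zero_of_lt hs hsl]
      omega
    rw [this]
    have : 0 ≤ h * hc + s := by positivity
    simp [this]
  · rw [PySem.Int.mod_eq_emod_of_pos hhc, add_comm, Int.add_mul_emod_self_right,
        Int.emod_eq_of_lt hs hsl]

-- ===== VERDICT (by name: the statement is the Claim_ definition above) =====
theorem get_date_time_list_spec : Claim_equal_get_date_time_list := by
  intro resolution _ hpre
  unfold Spec_get_date_time_list get_date_time_list get_date_time_list_alt
  simp only [PySem.List.foldl_append_singleton_eq_map, PySem.List.foldl_append_eq_flatMap,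
    List.nil_append]
  congr 1
  by_cases hpos : 0 < Int.tdiv 60 resolution
  · have h24 : Int.tdiv 60 resolution * 24 = ((24 : Nat) : Int) * Int.tdiv 60 resolution := by
      push_cast; ring
    rw [h24]
    rw [pv_map_range_mul_eq_flatMap (Int.tdiv 60 resolution) hpos _
      (fun h s => pvFmt02 h ++ ":" ++ pvFmt02 (s * resolution))
      (fun h s hh hs hsl => by
        obtain ⟨hd, hm⟩ := pv_decode (Int.tdiv 60 resolution) h s hpos hh hs hsl
        simp [pvFmt02, hd, hm]) 24]
    norm_num
  · have hnil1 : PySem.List.pyRange 0 (Int.tdiv 60 resolution * 24) 1 = [] :=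
      PySem.List.pyRange_one_eq_nil (by omega)
    have hnil2 : PySem.List.pyRange 0 (Int.tdiv 60 resolution) 1 = [] :=
      PySem.List.pyRange_one_eq_nil (by omega)
    simp [hnil1, hnil2]
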